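-- pv_equiv track=rewrite | github.com/ShlyapaEx/algorithms_training | Яндекс. Тренировка алгоритмов 1.0/Домашнее задание по лекции 5/C. Tourism.py | create_reverse_prefix_ups
-- ===== SOURCE A (Python) =====
-- def create_reverse_prefix_ups(points_heights: list) -> list[int]:
--     reverse_prefix_ups = [0] * (len(points_heights))
--
--     for i in range(len(points_heights) - 2, -1, -1):
--         height_change = points_heights[i] - points_heights[i + 1]
--         if height_change < 0:
--             height_change = 0
--         reverse_prefix_ups[i] += reverse_prefix_ups[i + 1] + height_change
--
--     return reverse_prefix_ups
-- ===== SOURCE B (Python) =====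
-- def create_reverse_prefix_ups(points_heights: list) -> list[int]:
--     # Forward pass: suffix sum of positive drops = total drops minus prefix sum of drops.
--     if not points_heights:
--         return []
--     drops = [max(0, a - b) for a, b in zip(points_heights, points_heights[1:])]
--     total = sum(drops)
--     out = []
--     acc = 0
--     for d in drops:
--         out.append(total - acc)
--         acc += d
--     out.append(0)
--     return out
-- ===== Notes on version B (the rewrite author's own statement) =====
-- stated objective: alternative
-- what changed: Replaces A's backward in-place suffix accumulation with a forward pass that exploits the identity suffix_sum(i) = total - prefix_sum(i): it sums all positive drops once, then builds the output left-to-right as total minus a running prefix accumulator (no backward loop, no in-place writes).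
import Mathlib
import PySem

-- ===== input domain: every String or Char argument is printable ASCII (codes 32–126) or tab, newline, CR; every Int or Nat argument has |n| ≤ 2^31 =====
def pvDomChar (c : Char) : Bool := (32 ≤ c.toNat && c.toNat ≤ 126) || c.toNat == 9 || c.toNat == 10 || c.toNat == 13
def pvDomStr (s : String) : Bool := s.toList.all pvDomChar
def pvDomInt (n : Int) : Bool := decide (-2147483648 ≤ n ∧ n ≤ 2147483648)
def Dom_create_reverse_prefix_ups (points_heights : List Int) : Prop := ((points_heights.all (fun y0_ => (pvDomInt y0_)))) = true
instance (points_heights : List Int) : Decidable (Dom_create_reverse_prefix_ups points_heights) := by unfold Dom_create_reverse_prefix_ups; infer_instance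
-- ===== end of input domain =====

-- B replaces A's backward in-place suffix accumulation by a forward pass using
-- suffix_sum(i) = total - prefix_sum(i): sum all positive drops once, then emit
-- total minus a running prefix accumulator left-to-right; same values everywhere.

-- ===== PORT A =====
-- loop body of A: reverse_prefix_ups[i] += reverse_prefix_ups[i+1] + height_change
def pvStepA (points_heights : List Int) (rpu : List Int) (i : Int) : List Int :=
  let height_change := PySem.List.pyGetD points_heights i 0 - PySem.List.pyGetD points_heights (i + 1) 0
  let height_change := if height_change < 0 then 0 else height_change
  PySem.List.pySetD rpu i (PySem.List.pyGetD rpu i 0 + (PySem.List.pyGetD rpu (i + 1) 0 + height_change))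
  -- indices i, i+1 are always in range (0 ≤ i ≤ len-2), so pyGetD/pySetD are exact here

def create_reverse_prefix_ups (points_heights : List Int) : List Int :=
  let reverse_prefix_ups := List.replicate points_heights.length (0 : Int)
  (PySem.List.pyRange ((points_heights.length : Int) - 2) (-1) (-1)).foldl
    (pvStepA points_heights) reverse_prefix_ups

-- ===== PORT B =====
def create_reverse_prefix_ups_alt (points_heights : List Int) : List Int :=
  if points_heights = [] then []
  else
    let drops := (points_heights.zip (PySem.List.slice points_heights (some 1) none)).map
      (fun p => max 0 (p.1 - p.2))
    let total := drops.sum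
    -- forward loop: out.append(total - acc); acc += d
    let st := drops.foldl (fun (st : List Int × Int) d => (st.1 ++ [total - st.2], st.2 + d)) ([], 0)
    st.1 ++ [0]

-- ===== PRECONDITION & SPEC =====
def Spec_create_reverse_prefix_ups (points_heights : List Int) (out : List Int) : Prop := out = create_reverse_prefix_ups_alt points_heights
instance (points_heights : List Int) (out : List Int) : Decidable (Spec_create_reverse_prefix_ups points_heights out) := by unfold Spec_create_reverse_prefix_ups; infer_instance

-- ===== CLAIM (what is proved, stated in full; the proofs are below) =====
def Claim_equal_create_reverse_prefix_ups : Prop := ∀ (points_heights : List Int), Dom_create_reverse_prefix_ups points_heights → Spec_create_reverse_prefix_ups points_heights (create_reverse_prefix_ups points_heights)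

-- ===== LEMMAS AND PROOFS =====

-- the common recursive characterisation: suffix sums of the positive height drops
def pvSuffix : List Int → List Int
  | [] => []
  | [_] => [0]
  | a :: b :: t => ((pvSuffix (b :: t)).headD 0 + max 0 (a - b)) :: pvSuffix (b :: t)

lemma getD_append_len (xs L : List Int) (k : Nat) (d : Int) :
    (xs ++ L).getD (xs.length + k) d = L.getD k d := by
  induction xs with
  | nil => simp
  | cons a xs ih => simpa [Nat.succ_add] using ih

lemma set_replicate_cons (m : Nat) (L : List Int) (v w : Int) :
    (List.replicate m (0 : Int) ++ w :: L).set m v = List.replicate m 0 ++ v :: L := by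
  induction m with
  | zero => simp
  | succ m ih => simpa [List.replicate_succ] using ih

-- drops of a list, recursively
def pvDrops : List Int → List Int
  | a :: b :: t => max 0 (a - b) :: pvDrops (b :: t)
  | _ => []

lemma drops_eq_pvDrops (hs : List Int) :
    (hs.zip (PySem.List.slice hs (some 1) none)).map (fun p => max 0 (p.1 - p.2)) = pvDrops hs := by
  induction hs with
  | nil => simp [pvDrops]
  | cons a t ih =>
    cases t with
    | nil => simp [pvDrops, PySem.List.slice_from_one]
    | cons b u =>
      rw [PySem.List.slice_from_one] at ih ⊢
      simp only [List.tail_cons] at ih ⊢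
      rw [show (a :: b :: u).zip (b :: u) = (a, b) :: ((b :: u).zip u) by simp [List.zip],
        List.map_cons, ih, pvDrops]

-- the forward foldl emits total - (running prefix sums)
def pvCountdown : List Int → Int → List Int
  | [], _ => []
  | d :: ds, c => c :: pvCountdown ds (c - d)

lemma foldl_countdown (total : Int) (ds : List Int) : ∀ (res : List Int) (acc : Int),
    (ds.foldl (fun (st : List Int × Int) d => (st.1 ++ [total - st.2], st.2 + d)) (res, acc)).1
      = res ++ pvCountdown ds (total - acc) := by
  induction ds with
  | nil => intro res acc; simp [pvCountdown]
  | cons d ds ih =>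
    intro res acc
    rw [List.foldl_cons, ih (res ++ [total - acc]) (acc + d), List.append_assoc]
    congr 1
    simp [pvCountdown]
    congr 1
    ring_nf

lemma headD_countdown_sum (ds : List Int) :
    (pvCountdown ds ds.sum ++ [0]).headD 0 = ds.sum := by
  cases ds <;> simp [pvCountdown]

-- pvSuffix as a countdown from the total
lemma pvSuffix_eq_countdown (a : Int) (t : List Int) :
    pvSuffix (a :: t) = pvCountdown (pvDrops (a :: t)) ((pvDrops (a :: t)).sum) ++ [0] := by
  induction t generalizing a with
  | nil => simp [pvSuffix, pvDrops, pvCountdown]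
  | cons b u ih =>
    have hS : max 0 (a - b) + (pvDrops (b :: u)).sum - max 0 (a - b)
        = (pvDrops (b :: u)).sum := by ring
    simp only [pvSuffix, pvDrops, pvCountdown, List.sum_cons, ih b, hS,
      List.cons_append, List.cons.injEq]
    exact ⟨by rw [headD_countdown_sum]; ring, trivial⟩

lemma alt_eq_pvSuffix (hs : List Int) : create_reverse_prefix_ups_alt hs = pvSuffix hs := by
  cases hs with
  | nil => simp [create_reverse_prefix_ups_alt, pvSuffix]
  | cons a t =>
    simp only [create_reverse_prefix_ups_alt, if_neg (show ¬(a :: t = []) by simp),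
      drops_eq_pvDrops]
    rw [foldl_countdown _ _ [] 0, List.nil_append, sub_zero, ← pvSuffix_eq_countdown]

-- A's backward loop invariant: processing indices m-1 … 0 turns the mixed state into pvSuffix
lemma loopA (hs : List Int) (m : Nat) (hm : m + 1 ≤ hs.length) :
    (PySem.List.pyRange ((m : Int) - 1) (-1) (-1)).foldl (pvStepA hs)
      (List.replicate m (0 : Int) ++ pvSuffix (hs.drop m)) = pvSuffix hs := by
  induction m with
  | zero =>
    rw [PySem.List.pyRange_neg_one_eq_nil (by norm_num)]
    simp
  | succ m ih =>
    have hm' : m + 1 ≤ hs.length := by omega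
    have hlen : 2 ≤ (hs.drop m).length := by simp; omega
    obtain ⟨a, b, u, hdrop⟩ : ∃ a b u, hs.drop m = a :: b :: u := by
      match h : hs.drop m with
      | [] => rw [h] at hlen; simp at hlen
      | [x] => rw [h] at hlen; simp at hlen
      | a :: b :: u => exact ⟨a, b, u, rfl⟩
    have hdrop1 : hs.drop (m + 1) = b :: u := by
      rw [← List.tail_drop, hdrop]; rfl
    have htake : hs = hs.take m ++ (a :: b :: u) := by rw [← hdrop, List.take_append_drop]
    have htlen : (hs.take m).length = m := by simp; omega
    -- values read from hs
    have hga : PySem.List.pyGetD hs (m : Int) 0 = a := by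
      rw [PySem.List.pyGetD_natCast]
      conv_lhs => rw [htake]
      have := getD_append_len (hs.take m) (a :: b :: u) 0 0
      rw [htlen] at this
      simpa using this
    have hgb : PySem.List.pyGetD hs ((m : Int) + 1) 0 = b := by
      rw [show ((m : Int) + 1) = ((m + 1 : Nat) : Int) by push_cast; ring, PySem.List.pyGetD_natCast]
      conv_lhs => rw [htake]
      have := getD_append_len (hs.take m) (a :: b :: u) 1 0
      rw [htlen] at this; simpa using this
    -- the state before processing index m, written with the replicate split off
    have hstate : List.replicate (m + 1) (0 : Int) ++ pvSuffix (hs.drop (m + 1))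
        = List.replicate m 0 ++ 0 :: pvSuffix (b :: u) := by
      rw [hdrop1, List.replicate_succ' ]; simp
    have hstep : pvStepA hs (List.replicate (m + 1) (0 : Int) ++ pvSuffix (hs.drop (m + 1))) (m : Int)
        = List.replicate m (0 : Int) ++ pvSuffix (hs.drop m) := by
      rw [hstate, hdrop]
      unfold pvStepA
      rw [hga, hgb, PySem.List.pySetD_natCast, PySem.List.pyGetD_natCast,
        show ((m : Int) + 1) = ((m + 1 : Nat) : Int) by push_cast; ring, PySem.List.pyGetD_natCast]
      have h1 : (List.replicate m (0:Int) ++ 0 :: pvSuffix (b :: u)).getD m 0 = 0 := by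
        have := getD_append_len (List.replicate m (0:Int)) (0 :: pvSuffix (b :: u)) 0 0
        simpa using this
      have h2 : (List.replicate m (0:Int) ++ 0 :: pvSuffix (b :: u)).getD (m + 1) 0
          = (pvSuffix (b :: u)).getD 0 0 := by
        have := getD_append_len (List.replicate m (0:Int)) (0 :: pvSuffix (b :: u)) 1 0
        simpa using this
      rw [h1, h2, set_replicate_cons]
      have hmax : (if a - b < 0 then (0:Int) else a - b) = max 0 (a - b) := by
        split_ifs with h <;> omega
      have hhd : (pvSuffix (b :: u)).getD 0 0 = (pvSuffix (b :: u)).headD 0 := by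
        cases pvSuffix (b :: u) <;> simp
      rw [hmax, hhd]
      cases u <;> simp [pvSuffix]
    rw [show ((m + 1 : Nat) : Int) - 1 = (m : Int) by push_cast; ring,
      PySem.List.pyRange_neg_one_cons (by omega : (-1:Int) < (m : Int)), List.foldl_cons,
      show ((m : Int)) - 1 = ((m : Nat) : Int) - 1 from rfl, hstep]
    exact ih hm'

lemma portA_eq_pvSuffix (hs : List Int) : create_reverse_prefix_ups hs = pvSuffix hs := by
  cases hs with
  | nil =>
    simp [create_reverse_prefix_ups, pvSuffix, PySem.List.pyRange_neg_one_eq_nil (by norm_num : (-2:Int) ≤ -1)]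
  | cons x t =>
    have hn : 1 ≤ (x :: t).length := by simp
    have hstart : ((x :: t).length : Int) - 2 = (((x :: t).length - 1 : Nat) : Int) - 1 := by
      simp; omega
    have hsingle : ∃ y, (x :: t).drop ((x :: t).length - 1) = [y] := by
      have hl : ((x :: t).drop ((x :: t).length - 1)).length = 1 := by simp
      match h : (x :: t).drop ((x :: t).length - 1) with
      | [y] => exact ⟨y, rfl⟩
      | [] => rw [h] at hl; simp at hl
      | y :: z :: w => rw [h] at hl; simp at hl
    obtain ⟨y, hy⟩ := hsingle
    have hinit : List.replicate ((x :: t).length) (0:Int)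
        = List.replicate ((x :: t).length - 1) 0 ++ pvSuffix ((x :: t).drop ((x :: t).length - 1)) := by
      rw [hy, show pvSuffix [y] = [0] from rfl,
        show (x :: t).length = ((x :: t).length - 1) + 1 by omega, List.replicate_succ']
      simp
    unfold create_reverse_prefix_ups
    rw [hstart, hinit]
    exact loopA (x :: t) ((x :: t).length - 1) (by omega)

-- ===== VERDICT (by name: the statement is the Claim_ definition above) =====
theorem create_reverse_prefix_ups_spec : Claim_equal_create_reverse_prefix_ups := by
  intro hs _
  unfold Spec_create_reverse_prefix_ups
  rw [portA_eq_pvSuffix, alt_eq_pvSuffix]
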